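-- pv_equiv track=rewrite | github.com/TenmonAI/tenmon-ark | api/automation/queue_store_v1.py | _downstream_adj
-- ===== SOURCE A (Python) =====
-- from typing import Any, Dict, List, Optional, Set, Tuple
--
-- def _downstream_adj(edges: List[Dict[str, Any]]) -> Dict[str, List[str]]:
--     """before -> after: after depends on before. adj[u] = list of v that depend on u."""
--     adj: Dict[str, List[str]] = {}
--     for e in edges:
--         if not isinstance(e, dict):
--             continue
--         b = e.get("before")
--         a = e.get("after")
--         if not isinstance(b, str) or not isinstance(a, str):
--             continue
--         adj.setdefault(b, []).append(a)
--     for k in adj: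
--         adj[k] = sorted(set(adj[k]))
--     return adj
-- ===== SOURCE B (Python) =====
-- def _downstream_adj(edges):
--     """before -> after: after depends on before. adj[u] = list of v that depend on u."""
--     raw = [(e.get("before"), e.get("after")) for e in edges if isinstance(e, dict)]
--     pairs = [(b, a) for b, a in raw if isinstance(b, str) and isinstance(a, str)]
--     keys = list(dict.fromkeys(b for b, _ in pairs))
--     return {k: sorted({a for b, a in pairs if b == k}) for k in keys}
-- ===== Notes on version B (the rewrite author's own statement) =====
-- stated objective: alternative
-- what changed: Replaces the incremental setdefault/append dict building plus in-place second sorting pass by a flat valid-pair list, a one-shot dict.fromkeys key dedup, and a per-key filter comprehension producing each sorted unique group.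
import Mathlib
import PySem

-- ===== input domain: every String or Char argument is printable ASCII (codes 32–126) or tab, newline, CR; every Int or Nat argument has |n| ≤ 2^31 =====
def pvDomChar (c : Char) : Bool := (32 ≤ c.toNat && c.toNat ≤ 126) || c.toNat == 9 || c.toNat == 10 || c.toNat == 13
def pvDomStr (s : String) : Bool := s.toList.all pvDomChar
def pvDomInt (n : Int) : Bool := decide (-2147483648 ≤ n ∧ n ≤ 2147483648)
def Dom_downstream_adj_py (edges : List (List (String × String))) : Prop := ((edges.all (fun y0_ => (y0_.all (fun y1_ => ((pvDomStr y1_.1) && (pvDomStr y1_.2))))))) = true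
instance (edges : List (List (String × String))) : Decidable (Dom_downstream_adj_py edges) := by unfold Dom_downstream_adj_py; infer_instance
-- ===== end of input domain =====

-- B builds a flat valid-pair list, dedups the keys once, and groups per key by filtering;
-- A builds the dict incrementally with setdefault/append and sorts in a second pass. Equal return values; alternative decomposition.

-- ===== PORT A =====
-- Loop body: isinstance(e, dict) is always true under the type; b/a are str whenever the
-- key is present, so the isinstance-str test is 'both lookups succeed'.
-- adj.setdefault(b, []).append(a) is adj[b] = adj.get(b, []) + [a], i.e. Dict.modify.
def downstream_adj_py (edges : List (List (String × String))) : List (String × List String) :=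
  let adj : PySem.Dict String (List String) :=
    edges.foldl (fun adj e =>
      match (PySem.Dict.mk e).get? "before", (PySem.Dict.mk e).get? "after" with
      | some b, some a => adj.modify b [] (· ++ [a])
      | _, _ => adj) PySem.Dict.empty
  -- for k in adj: adj[k] = sorted(set(adj[k]))
  (adj.items.map (fun p => (p.1, PySem.List.sorted (PySem.Set.ofList p.2) (fun x => x) false)))

-- ===== PORT B =====
def downstream_adj_py_alt (edges : List (List (String × String))) : List (String × List String) :=
  let raw := edges.map (fun e => ((PySem.Dict.mk e).get? "before", (PySem.Dict.mk e).get? "after"))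
  let pairs := raw.filterMap (fun p => p.1.bind (fun b => p.2.map (fun a => (b, a))))
  let keys := PySem.List.dedup (pairs.map (·.1))
  keys.map (fun k =>
    (k, PySem.List.sorted (PySem.Set.ofList ((pairs.filter (fun p => p.1 == k)).map (·.2))) (fun x => x) false))

-- ===== PRECONDITION & SPEC =====
def Spec_downstream_adj_py (edges : List (List (String × String))) (out : List (String × List String)) : Prop := out = downstream_adj_py_alt edges
instance (edges : List (List (String × String))) (out : List (String × List String)) : Decidable (Spec_downstream_adj_py edges out) := by unfold Spec_downstream_adj_py; infer_instance

-- ===== CLAIM (what is proved, stated in full; the proofs are below) =====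
def Claim_equal_downstream_adj_py : Prop := ∀ (edges : List (List (String × String))), Dom_downstream_adj_py edges → Spec_downstream_adj_py edges (downstream_adj_py edges)

-- ===== LEMMAS AND PROOFS =====

-- A's conditional fold over edges is the plain grouping fold over the filtered pair list.
theorem foldA_eq_fold_pairs (edges : List (List (String × String)))
    (d : PySem.Dict String (List String)) :
    edges.foldl (fun adj e =>
      match (PySem.Dict.mk e).get? "before", (PySem.Dict.mk e).get? "after" with
      | some b, some a => adj.modify b [] (· ++ [a])
      | _, _ => adj) d
    = ((edges.map (fun e => ((PySem.Dict.mk e).get? "before", (PySem.Dict.mk e).get? "after"))).filterMap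
        (fun p => p.1.bind (fun b => p.2.map (fun a => (b, a))))).foldl
        (fun adj p => adj.modify p.1 [] (· ++ [p.2])) d := by
  induction edges generalizing d with
  | nil => rfl
  | cons e es ih =>
    simp only [List.map_cons, List.filterMap_cons, List.foldl_cons]
    rcases hb : (PySem.Dict.mk e).get? "before" with _ | b <;>
      rcases ha : (PySem.Dict.mk e).get? "after" with _ | a <;>
      simp [ih]

theorem downstream_adj_py_eq (edges : List (List (String × String))) :
    downstream_adj_py edges = downstream_adj_py_alt edges := by
  simp only [downstream_adj_py, downstream_adj_py_alt]
  rw [foldA_eq_fold_pairs]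
  set pairs := ((edges.map (fun e => ((PySem.Dict.mk e).get? "before", (PySem.Dict.mk e).get? "after"))).filterMap
      (fun p => p.1.bind (fun b => p.2.map (fun a => (b, a))))) with hpairs
  set d := pairs.foldl (fun adj p => adj.modify p.1 [] (· ++ [p.2])) PySem.Dict.empty with hd
  have hnd : d.keys.Nodup := by
    rw [hd]
    exact PySem.Dict.nodup_keys_foldl_modify_key pairs (·.1) [] (fun _ p => (· ++ [p.2]))
      PySem.Dict.empty PySem.Dict.nodup_keys_empty
  have hkeys : d.keys = PySem.List.dedup (pairs.map (·.1)) := by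
    rw [hd, PySem.Dict.keys_foldl_modify_key]
    simp [PySem.Dict.keys_empty, PySem.Set.update, PySem.List.dedup_eq_ofList,
      PySem.Set.ofList_eq_foldl]
  have hitems : d.items = d.keys.map (fun k => (k, d.getD k [])) :=
    PySem.Dict.items_eq_map_keys d hnd []
  have hget : ∀ k : String, d.getD k [] = (pairs.filter (fun p => p.1 == k)).map (·.2) := by
    intro k
    rw [hd, PySem.Dict.getD_foldl_modify_append, PySem.Dict.getD_empty]
    simp
  rw [hitems, hkeys, List.map_map]
  apply List.map_congr_left
  intro k _
  simp [hget k]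

-- ===== VERDICT (by name: the statement is the Claim_ definition above) =====
theorem downstream_adj_py_spec : Claim_equal_downstream_adj_py := by
  intro edges _
  exact downstream_adj_py_eq edges
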